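-- pv_equiv track=rewrite | github.com/hallamlab/TreeSAPP | treesapp/lca_calculations.py | determine_offset
-- ===== SOURCE A (Python) =====
-- def determine_offset(classified: str, optimal: str) -> int:
--     # Figure out which taxonomic lineage is longer
--     offset = 0
--     while classified != optimal and offset < 7:
--         offset += 1
--         classified_ranks = classified.split("; ")
--         optimal_ranks = optimal.split("; ")
--         if len(classified_ranks) > len(optimal_ranks):
--             classified = "; ".join(classified_ranks[:-1])
--         elif len(classified_ranks) < len(optimal_ranks):
--             optimal = "; ".join(optimal_ranks[:-1])
--         else:
--             optimal = "; ".join(optimal_ranks[:-1])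
--             classified = "; ".join(classified_ranks[:-1])
--     return offset
-- ===== SOURCE B (Python) =====
-- def determine_offset(classified: str, optimal: str) -> int:
--     # Single prefix scan over the rank lists instead of repeated truncate-and-recompare.
--     a = classified.split("; ")
--     b = optimal.split("; ")
--     p = 0
--     for x, y in zip(a, b):
--         if x != y:
--             break
--         p += 1
--     return min(7, max(len(a), len(b)) - p)
-- ===== Notes on version B (the rewrite author's own statement) =====
-- stated objective: simpler
-- what changed: Replaced the repeated truncate-join-resplit-recompare loop by splitting both strings once, counting the longest common prefix of the rank lists in one zip scan, and returning min(7, max(len(a), len(b)) - p) in closed form.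
import Mathlib
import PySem

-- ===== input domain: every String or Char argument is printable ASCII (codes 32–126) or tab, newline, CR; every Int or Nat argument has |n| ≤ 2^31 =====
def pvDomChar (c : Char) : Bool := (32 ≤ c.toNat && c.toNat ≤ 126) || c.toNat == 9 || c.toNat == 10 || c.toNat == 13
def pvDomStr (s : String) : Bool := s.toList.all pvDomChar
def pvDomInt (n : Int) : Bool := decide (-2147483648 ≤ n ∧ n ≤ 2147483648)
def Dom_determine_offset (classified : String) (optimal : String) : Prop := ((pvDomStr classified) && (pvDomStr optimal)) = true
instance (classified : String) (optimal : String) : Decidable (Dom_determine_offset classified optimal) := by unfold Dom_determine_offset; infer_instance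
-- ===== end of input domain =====

-- B replaces A's repeated truncate-join-resplit loop by one split of each string, a single
-- longest-common-prefix scan of the two rank lists, and the closed form min(7, max(la, lb) - p).

-- ===== PORT A =====
-- 'while classified != optimal and offset < 7' runs at most 7 iterations (offset starts at 0 and
-- is incremented once per iteration), so fuel 7 reproduces the loop exactly; the fuel-0 branch is
-- reached only with offset = 7, where the guard is false anyway and offset is returned either way.
-- s.split("; "): the separator is the nonempty literal "; ", so PySem.Str.split? is always 'some'.
def detLoopA : Nat → String → String → Int → Int
  | 0, _, _, offset => offset
  | fuel+1, classified, optimal, offset =>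
    if classified ≠ optimal ∧ offset < 7 then
      let offset := offset + 1
      let classified_ranks := (PySem.Str.split? classified "; ").getD []
      let optimal_ranks := (PySem.Str.split? optimal "; ").getD []
      if classified_ranks.length > optimal_ranks.length then
        detLoopA fuel (PySem.Str.join "; " (PySem.List.slice classified_ranks none (some (-1)))) optimal offset
      else if classified_ranks.length < optimal_ranks.length then
        detLoopA fuel classified (PySem.Str.join "; " (PySem.List.slice optimal_ranks none (some (-1)))) offset
      else
        detLoopA fuel (PySem.Str.join "; " (PySem.List.slice classified_ranks none (some (-1))))
                      (PySem.Str.join "; " (PySem.List.slice optimal_ranks none (some (-1)))) offset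
    else offset

def determine_offset (classified : String) (optimal : String) : Int :=
  detLoopA 7 classified optimal 0

-- ===== PORT B =====
-- the 'for x, y in zip(a, b): if x != y: break; p += 1' prefix scan
def lcpRanks : List String → List String → Nat
  | x :: xs, y :: ys => if x = y then lcpRanks xs ys + 1 else 0
  | _, _ => 0

def determine_offset_alt (classified : String) (optimal : String) : Int :=
  let a := (PySem.Str.split? classified "; ").getD []
  let b := (PySem.Str.split? optimal "; ").getD []
  min 7 ((max a.length b.length : Int) - (lcpRanks a b : Int))

-- ===== PRECONDITION & SPEC =====
def Spec_determine_offset (classified : String) (optimal : String) (out : Int) : Prop := out = determine_offset_alt classified optimal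
instance (classified : String) (optimal : String) (out : Int) : Decidable (Spec_determine_offset classified optimal out) := by unfold Spec_determine_offset; infer_instance

-- ===== CLAIM (what is proved, stated in full; the proofs are below) =====
def Claim_equal_determine_offset : Prop := ∀ (classified : String) (optimal : String), Dom_determine_offset classified optimal → Spec_determine_offset classified optimal (determine_offset classified optimal)

-- ===== LEMMAS AND PROOFS =====

-- The separator "; " as a list of characters.
def dSep : List Char := [';', ' ']

-- Accumulator-free rendering of PySem.Chars.splitOn.go for the fixed separator dSep.
def splitNT : Nat → List Char → List (List Char)
  | 0, l => [l]
  | _+1, [] => [[]]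
  | fuel+1, c :: rest =>
    if dSep.isPrefixOf (c :: rest) then [] :: splitNT fuel ((c :: rest).drop dSep.length)
    else (splitNT fuel rest).modifyHead (c :: ·)

theorem splitNT_ne_nil (f : Nat) (l : List Char) : splitNT f l ≠ [] := by
  induction f generalizing l with
  | zero => simp [splitNT]
  | succ g ih =>
    cases l with
    | nil => simp [splitNT]
    | cons c rest =>
      simp only [splitNT]
      split
      · simp
      · have := ih rest
        cases h : splitNT g rest with
        | nil => exact absurd h this
        | cons p ps => simp

theorem go_eq (f : Nat) (l cur : List Char) (acc : List (List Char)) :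
    PySem.Chars.splitOn.go dSep f l cur acc
      = acc.reverse ++ (splitNT f l).modifyHead (cur.reverse ++ ·) := by
  induction f generalizing l cur acc with
  | zero => rw [PySem.Chars.splitOn.go.eq_def]; simp [splitNT]
  | succ g ih =>
    cases l with
    | nil => rw [PySem.Chars.splitOn.go.eq_def]; simp [splitNT]
    | cons c rest =>
      rw [PySem.Chars.splitOn.go.eq_def]
      simp only [splitNT]
      split
      · rw [ih]
        obtain ⟨p, ps, hps⟩ := List.exists_cons_of_ne_nil (splitNT_ne_nil g ((c :: rest).drop dSep.length))
        simp [hps]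
      · rw [ih]
        obtain ⟨p, ps, hps⟩ := List.exists_cons_of_ne_nil (splitNT_ne_nil g rest)
        simp [hps]

theorem splitOn_eq (l : List Char) :
    PySem.Chars.splitOn l dSep = splitNT (l.length + 1) l := by
  rw [PySem.Chars.splitOn, go_eq]
  obtain ⟨p, ps, hps⟩ := List.exists_cons_of_ne_nil (splitNT_ne_nil (l.length + 1) l)
  simp [hps]

theorem splitNT_fuel_irrel (f f' : Nat) (l : List Char) (h : l.length < f) (h' : l.length < f') :
    splitNT f l = splitNT f' l := by
  induction f generalizing f' l with
  | zero => omega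
  | succ g ih =>
    cases l with
    | nil =>
      obtain ⟨g', rfl⟩ : ∃ g', f' = g' + 1 := ⟨f' - 1, by omega⟩
      simp [splitNT]
    | cons c rest =>
      obtain ⟨g', rfl⟩ : ∃ g', f' = g' + 1 := ⟨f' - 1, by omega⟩
      simp only [splitNT]
      split
      · have hd : (List.drop dSep.length (c :: rest)).length < g := by
          simp only [List.length_drop, List.length_cons] at *
          simp only [dSep, List.length_cons, List.length_nil] at *
          omega
        have hd' : (List.drop dSep.length (c :: rest)).length < g' := by
          simp only [List.length_drop, List.length_cons] at *
          simp only [dSep, List.length_cons, List.length_nil] at *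
          omega
        rw [ih g' _ hd hd']
      · have hr : rest.length < g := by simp at h; omega
        have hr' : rest.length < g' := by simp at h'; omega
        rw [ih g' rest hr hr']

theorem splitNT_head_prefix (f : Nat) (l : List Char) (p : List Char) (ps : List (List Char))
    (h : splitNT f l = p :: ps) : p <+: l := by
  induction f generalizing l p ps with
  | zero => simp [splitNT] at h; simp [h.1]
  | succ g ih =>
    cases l with
    | nil => simp [splitNT] at h; simp [h.1]
    | cons c rest =>
      simp only [splitNT] at h
      split at h
      · simp only [List.cons.injEq] at h
        simp [← h.1]
      · obtain ⟨q, qs, hqs⟩ := List.exists_cons_of_ne_nil (splitNT_ne_nil g rest)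
        rw [hqs, List.modifyHead_cons] at h
        obtain ⟨h1, _⟩ := List.cons.injEq .. ▸ h
        have := ih rest q qs hqs
        rw [← h1]
        exact List.cons_prefix_cons.mpr ⟨rfl, this⟩

theorem splitNT_sepfree (f : Nat) (l : List Char) (h : l.length < f) :
    ∀ p ∈ splitNT f l, ¬ dSep <:+: p := by
  induction f generalizing l with
  | zero => omega
  | succ g ih =>
    cases l with
    | nil =>
      intro p hp
      simp [splitNT] at hp
      simp [hp, dSep]
    | cons c rest =>
      simp only [splitNT]
      split
      · rename_i hpre
        intro p hp
        rcases List.mem_cons.mp hp with rfl | hp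
        · simp [dSep]
        · have hlen : dSep.length ≤ (c :: rest).length := (List.isPrefixOf_iff_prefix.mp hpre).length_le
          refine ih _ ?_ p hp
          simp only [List.length_drop, List.length_cons] at *
          simp only [dSep, List.length_cons, List.length_nil] at *
          omega
      · rename_i hpre
        obtain ⟨q, qs, hqs⟩ := List.exists_cons_of_ne_nil (splitNT_ne_nil g rest)
        rw [hqs, List.modifyHead_cons]
        intro p hp
        have hrest : rest.length < g := by simp at h; omega
        rcases List.mem_cons.mp hp with rfl | hp
        · intro hinf
          rcases List.infix_cons_iff.mp hinf with hpre' | hinf'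
          · have hq : q <+: rest := splitNT_head_prefix g rest q qs hqs
            have : dSep <+: c :: rest := hpre'.trans (List.cons_prefix_cons.mpr ⟨rfl, hq⟩)
            exact absurd (List.isPrefixOf_iff_prefix.mpr this) (by simp [hpre])
          · exact ih rest hrest q (by simp [hqs]) hinf'
        · exact ih rest hrest p (by simp [hqs, hp])

theorem splitNT_of_sepfree (f : Nat) (l : List Char) (h : l.length < f) (hn : ¬ dSep <:+: l) :
    splitNT f l = [l] := by
  induction f generalizing l with
  | zero => omega
  | succ g ih =>
    cases l with
    | nil => simp [splitNT]
    | cons c rest =>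
      simp only [splitNT]
      split
      · rename_i hpre
        exact absurd ((List.isPrefixOf_iff_prefix.mp hpre).isInfix) hn
      · have hrest : rest.length < g := by simp at h; omega
        rw [ih rest hrest (fun hinf => hn (hinf.trans (List.infix_cons_iff.mpr (Or.inr (List.infix_refl rest)))))]
        simp

theorem splitNT_append (f f' : Nat) (x t : List Char)
    (h : (x ++ dSep ++ t).length < f) (h' : t.length < f') (hx : ¬ dSep <:+: x) :
    splitNT f (x ++ dSep ++ t) = x :: splitNT f' t := by
  induction x generalizing f with
  | nil =>
    obtain ⟨g, rfl⟩ : ∃ g, f = g + 1 := ⟨f - 1, by omega⟩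
    simp only [dSep, List.length_cons, List.length_nil, List.length_append, List.nil_append] at h
    have hpre : dSep.isPrefixOf (dSep ++ t) = true :=
      List.isPrefixOf_iff_prefix.mpr (List.prefix_append dSep t)
    simp only [List.nil_append]
    rw [show dSep ++ t = ';' :: (' ' :: t) from rfl]
    simp only [splitNT]
    rw [show (';' :: (' ' :: t)) = dSep ++ t from rfl]
    simp only [hpre, if_pos]
    rw [List.drop_left]
    congr 1
    apply splitNT_fuel_irrel
    · omega
    · exact h'
  | cons c x' ihx =>
    obtain ⟨g, rfl⟩ : ∃ g, f = g + 1 := ⟨f - 1, by omega⟩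
    have hnotpre : ¬ dSep <+: (c :: x') ++ dSep ++ t := by
      intro hpre
      -- dSep = [';',' ']: a prefix of c :: (x' ++ dSep ++ t)
      rcases List.cons_prefix_cons.mp (by simpa [dSep] using hpre) with ⟨rfl, hpre2⟩
      cases x' with
      | nil => simp at hpre2
      | cons d x'' =>
        have hd : ' ' = d := by simpa using hpre2
        subst hd
        exact hx (List.IsPrefix.isInfix ⟨x'', rfl⟩)
    simp only [List.cons_append, List.append_assoc] at hnotpre ⊢
    simp only [splitNT]
    rw [if_neg (by simpa [List.isPrefixOf_iff_prefix, List.append_assoc] using hnotpre)]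
    have hx' : ¬ dSep <:+: x' := fun hinf =>
      hx (hinf.trans (List.infix_cons_iff.mpr (Or.inr (List.infix_refl x'))))
    have := ihx g (by simp at h ⊢; omega) hx'
    simp only [List.append_assoc] at this
    rw [this, List.modifyHead_cons]

theorem join_modifyHead (c : Char) (L : List (List Char)) (hL : L ≠ []) :
    PySem.Chars.join dSep (L.modifyHead (c :: ·)) = c :: PySem.Chars.join dSep L := by
  obtain ⟨p, ps, rfl⟩ := List.exists_cons_of_ne_nil hL
  cases ps with
  | nil => simp [PySem.Chars.join_singleton]
  | cons q qs => simp [PySem.Chars.join_cons_cons]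

theorem join_splitNT (f : Nat) (l : List Char) (h : l.length < f) :
    PySem.Chars.join dSep (splitNT f l) = l := by
  induction f generalizing l with
  | zero => omega
  | succ g ih =>
    cases l with
    | nil => simp [splitNT, PySem.Chars.join_singleton]
    | cons c rest =>
      simp only [splitNT]
      split
      · rename_i hpre
        have hpre' := List.isPrefixOf_iff_prefix.mp hpre
        obtain ⟨q, qs, hqs⟩ := List.exists_cons_of_ne_nil
          (splitNT_ne_nil g (List.drop dSep.length (c :: rest)))
        have hdl : (List.drop dSep.length (c :: rest)).length < g := by
          have hlen : dSep.length ≤ (c :: rest).length := hpre'.length_le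
          simp only [List.length_drop, List.length_cons] at *
          simp only [dSep, List.length_cons, List.length_nil] at *
          omega
        rw [hqs, PySem.Chars.join_cons_cons, ← hqs, ih _ hdl]
        simp only [List.nil_append]
        exact List.prefix_iff_eq_append.mp hpre'
      · have hrest : rest.length < g := by simp at h; omega
        rw [join_modifyHead c _ (splitNT_ne_nil g rest), ih rest hrest]

theorem join_splitOn (l : List Char) :
    PySem.Chars.join dSep (PySem.Chars.splitOn l dSep) = l := by
  rw [splitOn_eq]; exact join_splitNT _ _ (by omega)

theorem splitOn_join (xs : List (List Char)) (hne : xs ≠ []) (hfree : ∀ p ∈ xs, ¬ dSep <:+: p) :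
    PySem.Chars.splitOn (PySem.Chars.join dSep xs) dSep = xs := by
  induction xs with
  | nil => exact absurd rfl hne
  | cons x ys ih =>
    cases ys with
    | nil =>
      rw [PySem.Chars.join_singleton, splitOn_eq]
      exact splitNT_of_sepfree _ _ (by omega) (hfree x (by simp))
    | cons y ys' =>
      rw [PySem.Chars.join_cons_cons, splitOn_eq,
        splitNT_append _ ((PySem.Chars.join dSep (y :: ys')).length + 1) x
          (PySem.Chars.join dSep (y :: ys')) (by omega) (by omega) (hfree x (by simp))]
      rw [← splitOn_eq, ih (by simp) (fun p hp => hfree p (by simp [hp]))]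

-- lcp over char lists, mirror of lcpRanks
def lcpC : List (List Char) → List (List Char) → Nat
  | x :: xs, y :: ys => if x = y then lcpC xs ys + 1 else 0
  | _, _ => 0

theorem lcpC_le_left (a b : List (List Char)) : lcpC a b ≤ a.length := by
  induction a generalizing b with
  | nil => simp [lcpC]
  | cons x xs ih =>
    cases b with
    | nil => simp [lcpC]
    | cons y ys =>
      simp only [lcpC, List.length_cons]
      split
      · have := ih ys; omega
      · omega

theorem lcpC_comm (a b : List (List Char)) : lcpC a b = lcpC b a := by
  induction a generalizing b with
  | nil => cases b <;> simp [lcpC]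
  | cons x xs ih =>
    cases b with
    | nil => simp [lcpC]
    | cons y ys =>
      simp only [lcpC]
      rcases eq_or_ne x y with rfl | hxy
      · simp [ih ys]
      · rw [if_neg hxy, if_neg (Ne.symm hxy)]

theorem lcpC_self (a : List (List Char)) : lcpC a a = a.length := by
  induction a with
  | nil => simp [lcpC]
  | cons x xs ih => simp [lcpC, ih]

theorem eq_of_lcpC (a b : List (List Char)) (hl : a.length = b.length) (hp : lcpC a b = a.length) :
    a = b := by
  induction a generalizing b with
  | nil => cases b with | nil => rfl | cons y ys => simp at hl
  | cons x xs ih =>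
    cases b with
    | nil => simp at hl
    | cons y ys =>
      simp only [lcpC, List.length_cons] at hl hp
      rcases eq_or_ne x y with rfl | hxy
      · rw [if_pos rfl] at hp
        rw [ih ys (by omega) (by omega)]
      · rw [if_neg hxy] at hp; omega

theorem lcpC_dropLast_left (a b : List (List Char)) (h : lcpC a b < a.length) :
    lcpC a.dropLast b = lcpC a b := by
  induction a generalizing b with
  | nil => simp at h
  | cons x xs ih =>
    cases b with
    | nil => simp [lcpC]
    | cons y ys =>
      simp only [lcpC, List.length_cons] at h ⊢
      rcases eq_or_ne x y with rfl | hxy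
      · rw [if_pos rfl] at h
        have hxs : xs ≠ [] := by
          intro hx; subst hx; simp [lcpC] at h
        rw [List.dropLast_cons_of_ne_nil hxs]
        simp only [lcpC]
        rw [ih ys (by omega)]
      · rw [if_neg hxy] at h ⊢
        cases hx : (x :: xs).dropLast with
        | nil => simp [lcpC]
        | cons z zs =>
          have hz : z = x := by
            cases xs with
            | nil => simp at hx
            | cons w ws => simp [List.dropLast_cons_of_ne_nil] at hx; exact hx.1.symm
          subst hz
          simp [lcpC, if_neg hxy]

-- Bridge layer: everything at the level of char lists
def Lc (s : String) : List (List Char) := PySem.Chars.splitOn s.toList dSep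

def mM (c o : String) : Nat := max (Lc c).length (Lc o).length - lcpC (Lc c) (Lc o)

theorem Lc_ne_nil (s : String) : Lc s ≠ [] := by
  rw [Lc, splitOn_eq]; exact splitNT_ne_nil _ _

theorem Lc_inj {s t : String} (h : Lc s = Lc t) : s = t := by
  have := congrArg (PySem.Chars.join dSep) h
  rw [Lc, Lc, join_splitOn, join_splitOn] at this
  exact String.toList_inj.mp this

theorem Lc_sepfree (s : String) : ∀ p ∈ Lc s, ¬ dSep <:+: p := by
  rw [Lc, splitOn_eq]; exact splitNT_sepfree _ _ (by omega)

theorem split_getD_eq (s : String) :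
    (PySem.Str.split? s "; ").getD [] = (Lc s).map String.ofList := by
  rw [PySem.Str.split?, PySem.Chars.split?]
  rfl

theorem lcpRanks_map (a b : List (List Char)) :
    lcpRanks (a.map String.ofList) (b.map String.ofList) = lcpC a b := by
  induction a generalizing b with
  | nil => cases b <;> simp [lcpRanks, lcpC]
  | cons x xs ih =>
    cases b with
    | nil => simp [lcpRanks, lcpC]
    | cons y ys =>
      simp only [List.map_cons, lcpRanks, lcpC]
      rcases eq_or_ne x y with rfl | hxy
      · simp [ih ys]
      · rw [if_neg hxy, if_neg (fun h => hxy (by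
          have := congrArg String.toList h
          simpa [String.toList_ofList] using this))]

-- the truncation expression of port A, as one helper
def nxt (s : String) : String :=
  PySem.Str.join "; " (PySem.List.slice ((PySem.Str.split? s "; ").getD []) none (some (-1)))

theorem toList_nxt (s : String) :
    (nxt s).toList = PySem.Chars.join dSep (Lc s).dropLast := by
  rw [nxt, split_getD_eq, PySem.List.slice_to_neg_one, PySem.Str.join, String.toList_ofList]
  congr 1
  rw [← List.map_dropLast, List.map_map]
  have : (String.toList ∘ String.ofList) = id := funext (fun l => String.toList_ofList)
  rw [this, List.map_id]

theorem Lc_nxt (s : String) :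
    Lc (nxt s) = if (Lc s).length = 1 then [[]] else (Lc s).dropLast := by
  rw [Lc, toList_nxt]
  split
  · rename_i h1
    obtain ⟨p, ps, hps⟩ := List.exists_cons_of_ne_nil (Lc_ne_nil s)
    rw [hps] at h1
    have : ps = [] := by simpa using h1
    subst this
    rw [hps]
    show PySem.Chars.splitOn (PySem.Chars.join dSep [p].dropLast) dSep = [[]]
    rw [show ([p].dropLast : List (List Char)) = [] from rfl, PySem.Chars.join_nil, splitOn_eq]
    rfl
  · rename_i h1
    have hne : (Lc s).dropLast ≠ [] := by
      have h2 := Lc_ne_nil s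
      intro h3
      rcases List.exists_cons_of_ne_nil h2 with ⟨p, ps, hps⟩
      rw [hps] at h3 h1
      cases ps with
      | nil => simp at h1
      | cons q qs => simp [List.dropLast_cons_of_ne_nil] at h3
    exact splitOn_join _ hne (fun p hp => Lc_sepfree s p (List.dropLast_subset _ hp))

theorem mM_eq_zero_iff (c o : String) : mM c o = 0 ↔ c = o := by
  constructor
  · intro h
    rw [mM] at h
    have h1 := lcpC_le_left (Lc c) (Lc o)
    have h2 : lcpC (Lc c) (Lc o) ≤ (Lc o).length := by
      rw [lcpC_comm]; exact lcpC_le_left _ _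
    have hl : (Lc c).length = (Lc o).length := by omega
    have hp : lcpC (Lc c) (Lc o) = (Lc c).length := by omega
    exact Lc_inj (eq_of_lcpC _ _ hl hp)
  · rintro rfl
    simp [mM, lcpC_self]

-- one step of A's truncation decreases mM by exactly 1 (three branches)
theorem step_gt (c o : String) (hgt : (Lc o).length < (Lc c).length) :
    mM (nxt c) o + 1 = mM c o := by
  have hb := List.length_pos_of_ne_nil (Lc_ne_nil o)
  have hp2 : lcpC (Lc c) (Lc o) ≤ (Lc o).length := by
    rw [lcpC_comm]; exact lcpC_le_left _ _
  have hlc : Lc (nxt c) = (Lc c).dropLast := by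
    rw [Lc_nxt, if_neg (by omega)]
  rw [mM, mM, hlc, List.length_dropLast, lcpC_dropLast_left _ _ (by omega)]
  omega

theorem step_lt (c o : String) (hlt : (Lc c).length < (Lc o).length) :
    mM c (nxt o) + 1 = mM c o := by
  have ha := List.length_pos_of_ne_nil (Lc_ne_nil c)
  have hp1 := lcpC_le_left (Lc c) (Lc o)
  have hlo : Lc (nxt o) = (Lc o).dropLast := by
    rw [Lc_nxt, if_neg (by omega)]
  rw [mM, mM, hlo, List.length_dropLast]
  have e1 : lcpC (Lc c) (Lc o).dropLast = lcpC (Lc c) (Lc o) := by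
    rw [lcpC_comm, lcpC_dropLast_left _ _ (by rw [lcpC_comm]; omega), lcpC_comm]
  rw [e1]
  omega

theorem step_eq (c o : String) (hne : c ≠ o) (heq : (Lc c).length = (Lc o).length) :
    mM (nxt c) (nxt o) + 1 = mM c o := by
  have hab : Lc c ≠ Lc o := fun h => hne (Lc_inj h)
  have ha := List.length_pos_of_ne_nil (Lc_ne_nil c)
  have hp1 := lcpC_le_left (Lc c) (Lc o)
  have hplt : lcpC (Lc c) (Lc o) < (Lc c).length := by
    rcases lt_or_eq_of_le hp1 with h | h
    · exact h
    · exact absurd (eq_of_lcpC _ _ heq h) hab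
  rcases Nat.lt_or_ge (Lc c).length 2 with h1 | h1
  · -- both singleton: both next strings split to [[]]
    have hc1 : (Lc c).length = 1 := by omega
    rw [mM, mM, Lc_nxt, Lc_nxt, if_pos hc1, if_pos (heq ▸ hc1)]
    simp only [lcpC_self, List.length_cons, List.length_nil]
    omega
  · have hc : Lc (nxt c) = (Lc c).dropLast := by rw [Lc_nxt, if_neg (by omega)]
    have ho : Lc (nxt o) = (Lc o).dropLast := by rw [Lc_nxt, if_neg (by omega)]
    have e1 : lcpC (Lc c).dropLast (Lc o) = lcpC (Lc c) (Lc o) :=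
      lcpC_dropLast_left _ _ hplt
    have e2 : lcpC (Lc c).dropLast (Lc o).dropLast = lcpC (Lc c).dropLast (Lc o) := by
      rw [lcpC_comm, lcpC_dropLast_left _ _ (by rw [lcpC_comm, e1]; omega), lcpC_comm]
    rw [mM, mM, hc, ho, List.length_dropLast, List.length_dropLast, e2, e1]
    omega

theorem detLoopA_eq (f : Nat) (hf : f ≤ 7) (c o : String) :
    detLoopA f c o (7 - (f : Int)) = (7 - (f : Int)) + min (f : Int) (mM c o : Int) := by
  induction f generalizing c o with
  | zero => simp [detLoopA]
  | succ g ih =>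
    rcases eq_or_ne c o with rfl | hne
    · rw [detLoopA, if_neg (by simp)]
      rw [(mM_eq_zero_iff c c).mpr rfl]
      have hmin : min ((g : Int) + 1) (((0 : Nat) : Int)) = 0 := by
        push_cast; omega
      push_cast at hmin ⊢
      omega
    · have hm1 : 1 ≤ mM c o := by
        rcases Nat.eq_zero_or_pos (mM c o) with h | h
        · exact absurd ((mM_eq_zero_iff c o).mp h) hne
        · exact h
      rw [detLoopA, if_pos ⟨hne, by push_cast; omega⟩]
      simp only [split_getD_eq, List.length_map]
      push_cast
      rw [show (7 : Int) - (↑g + 1) + 1 = 7 - ↑g from by ring]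
      rcases lt_trichotomy (Lc o).length (Lc c).length with hlt | heq | hgt
      · rw [if_pos hlt,
          show PySem.Str.join "; " (PySem.List.slice ((Lc c).map String.ofList) none (some (-1)))
            = nxt c from by rw [nxt, split_getD_eq]]
        have hstep := step_gt c o hlt
        have ihx := ih (by omega) (nxt c) o
        rw [ihx]
        omega
      · rw [if_neg (by omega), if_neg (by omega),
          show PySem.Str.join "; " (PySem.List.slice ((Lc c).map String.ofList) none (some (-1)))
            = nxt c from by rw [nxt, split_getD_eq],
          show PySem.Str.join "; " (PySem.List.slice ((Lc o).map String.ofList) none (some (-1)))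
            = nxt o from by rw [nxt, split_getD_eq]]
        have hstep := step_eq c o hne heq.symm
        have ihx := ih (by omega) (nxt c) (nxt o)
        rw [ihx]
        omega
      · rw [if_neg (by omega), if_pos hgt,
          show PySem.Str.join "; " (PySem.List.slice ((Lc o).map String.ofList) none (some (-1)))
            = nxt o from by rw [nxt, split_getD_eq]]
        have hstep := step_lt c o hgt
        have ihx := ih (by omega) c (nxt o)
        rw [ihx]
        omega

-- ===== VERDICT (by name: the statement is the Claim_ definition above) =====
theorem determine_offset_spec : Claim_equal_determine_offset := by
  intro c o _
  unfold Spec_determine_offset determine_offset determine_offset_alt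
  have h := detLoopA_eq 7 (by omega) c o
  norm_num at h
  rw [h]
  simp only [split_getD_eq, List.length_map, lcpRanks_map]
  have h1 := lcpC_le_left (Lc c) (Lc o)
  have h2 : lcpC (Lc c) (Lc o) ≤ (Lc o).length := by
    rw [lcpC_comm]; exact lcpC_le_left _ _
  rw [mM]
  omega
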